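-- pv_equiv track=rewrite | github.com/beloureiro/AI-CAC-V1.3 | LmStudio/Rag_bot/ragbot_streamlit_1.1.py | check_emotional_cues
-- ===== SOURCE A (Python) =====
-- def check_emotional_cues(query):
--     positive_cues = ['happy', 'satisfied',
--                      'pleased', 'grateful', 'excited']
--     negative_cues = ['upset', 'frustrated',
--                      'angry', 'disappointed', 'worried']
--
--     words = query.lower().split()
--     positive_match = any(cue in words for cue in positive_cues)
--     negative_match = any(cue in words for cue in negative_cues)
--
--     if positive_match and not negative_match:
--         return "positive"
--     elif negative_match and not positive_match:
--         return "negative"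
--     else:
--         return "neutral"
-- ===== SOURCE B (Python) =====
-- _SENTIMENT = {
--     'happy': 'pos', 'satisfied': 'pos', 'pleased': 'pos',
--     'grateful': 'pos', 'excited': 'pos',
--     'upset': 'neg', 'frustrated': 'neg', 'angry': 'neg',
--     'disappointed': 'neg', 'worried': 'neg',
-- }
--
-- def check_emotional_cues(query):
--     positive_match = False
--     negative_match = False
--     for word in query.lower().split():
--         tag = _SENTIMENT.get(word)
--         if tag == 'pos':
--             positive_match = True
--         elif tag == 'neg':
--             negative_match = True
--     if positive_match and not negative_match:
--         return "positive"
--     elif negative_match and not positive_match: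
--         return "negative"
--     else:
--         return "neutral"
-- ===== Notes on version B (the rewrite author's own statement) =====
-- stated objective: alternative
-- what changed: Single pass over the query's words with a cue-word->sentiment lookup table setting two flags, instead of ten repeated membership scans of the word list (one per cue).
import Mathlib
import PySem

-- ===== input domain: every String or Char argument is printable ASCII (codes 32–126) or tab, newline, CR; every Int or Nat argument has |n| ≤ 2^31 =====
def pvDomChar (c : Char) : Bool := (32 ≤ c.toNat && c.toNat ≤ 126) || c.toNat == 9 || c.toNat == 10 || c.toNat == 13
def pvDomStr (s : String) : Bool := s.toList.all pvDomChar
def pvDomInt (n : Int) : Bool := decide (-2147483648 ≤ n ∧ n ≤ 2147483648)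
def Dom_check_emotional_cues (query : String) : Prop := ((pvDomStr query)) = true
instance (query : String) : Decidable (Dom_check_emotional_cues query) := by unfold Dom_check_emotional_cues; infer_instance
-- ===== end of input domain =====

set_option maxRecDepth 4096


-- B replaces A's ten membership scans of the word list with one pass over the words
-- against a cue→sentiment lookup table setting two flags (alternative decomposition).

-- ===== PORT A =====
def check_emotional_cues (query : String) : String :=
  let positive_cues := ["happy", "satisfied", "pleased", "grateful", "excited"]
  let negative_cues := ["upset", "frustrated", "angry", "disappointed", "worried"]
  let words := PySem.Str.split₀ (PySem.Str.lower query)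
  let positive_match := positive_cues.any (fun cue => words.contains cue)
  let negative_match := negative_cues.any (fun cue => words.contains cue)
  if positive_match && !negative_match then "positive"
  else if negative_match && !positive_match then "negative"
  else "neutral"

-- ===== PORT B =====
def sentimentDict : PySem.Dict String String :=
  PySem.Dict.ofList
    [("happy", "pos"), ("satisfied", "pos"), ("pleased", "pos"),
     ("grateful", "pos"), ("excited", "pos"),
     ("upset", "neg"), ("frustrated", "neg"), ("angry", "neg"),
     ("disappointed", "neg"), ("worried", "neg")]

-- one iteration of B's loop body: read the tag for `word` and set the matching flag
def sentimentStep (st : Bool × Bool) (word : String) : Bool × Bool :=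
  let tag := sentimentDict.get? word
  if tag == some "pos" then (true, st.2)
  else if tag == some "neg" then (st.1, true)
  else st

def check_emotional_cues_alt (query : String) : String :=
  let flags := (PySem.Str.split₀ (PySem.Str.lower query)).foldl sentimentStep (false, false)
  if flags.1 && !flags.2 then "positive"
  else if flags.2 && !flags.1 then "negative"
  else "neutral"

-- ===== PRECONDITION & SPEC =====
def Spec_check_emotional_cues (query : String) (out : String) : Prop := out = check_emotional_cues_alt query
instance (query : String) (out : String) : Decidable (Spec_check_emotional_cues query out) := by unfold Spec_check_emotional_cues; infer_instance

-- ===== CLAIM (what is proved, stated in full; the proofs are below) =====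
def Claim_equal_check_emotional_cues : Prop := ∀ (query : String), Dom_check_emotional_cues query → Spec_check_emotional_cues query (check_emotional_cues query)

-- ===== LEMMAS AND PROOFS =====

def isPosWord (w : String) : Bool := sentimentDict.get? w == some "pos"
def isNegWord (w : String) : Bool := sentimentDict.get? w == some "neg"

theorem sentimentDict_eq_mk : sentimentDict = PySem.Dict.mk
    [("happy", "pos"), ("satisfied", "pos"), ("pleased", "pos"),
     ("grateful", "pos"), ("excited", "pos"),
     ("upset", "neg"), ("frustrated", "neg"), ("angry", "neg"),
     ("disappointed", "neg"), ("worried", "neg")] := by decide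

theorem isPos_iff (w : String) :
    isPosWord w = (["happy", "satisfied", "pleased", "grateful", "excited"] : List String).contains w := by
  rw [isPosWord, sentimentDict_eq_mk]
  by_cases h1 : w = "happy"
  · subst h1; decide
  by_cases h2 : w = "satisfied"
  · subst h2; decide
  by_cases h3 : w = "pleased"
  · subst h3; decide
  by_cases h4 : w = "grateful"
  · subst h4; decide
  by_cases h5 : w = "excited"
  · subst h5; decide
  by_cases h6 : w = "upset"
  · subst h6; decide
  by_cases h7 : w = "frustrated"
  · subst h7; decide
  by_cases h8 : w = "angry"
  · subst h8; decide
  by_cases h9 : w = "disappointed"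
  · subst h9; decide
  by_cases h10 : w = "worried"
  · subst h10; decide
  simp [PySem.Dict.get?, List.contains_eq_mem, beq_iff_eq, h1, Ne.symm h1, h2, Ne.symm h2, h3, Ne.symm h3, h4, Ne.symm h4, h5, Ne.symm h5, Ne.symm h6, Ne.symm h7, Ne.symm h8, Ne.symm h9, Ne.symm h10]

theorem isNeg_iff (w : String) :
    isNegWord w = (["upset", "frustrated", "angry", "disappointed", "worried"] : List String).contains w := by
  rw [isNegWord, sentimentDict_eq_mk]
  by_cases h1 : w = "happy"
  · subst h1; decide
  by_cases h2 : w = "satisfied"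
  · subst h2; decide
  by_cases h3 : w = "pleased"
  · subst h3; decide
  by_cases h4 : w = "grateful"
  · subst h4; decide
  by_cases h5 : w = "excited"
  · subst h5; decide
  by_cases h6 : w = "upset"
  · subst h6; decide
  by_cases h7 : w = "frustrated"
  · subst h7; decide
  by_cases h8 : w = "angry"
  · subst h8; decide
  by_cases h9 : w = "disappointed"
  · subst h9; decide
  by_cases h10 : w = "worried"
  · subst h10; decide
  simp [PySem.Dict.get?, List.contains_eq_mem, beq_iff_eq, Ne.symm h1, Ne.symm h2, Ne.symm h3, Ne.symm h4, Ne.symm h5, h6, Ne.symm h6, h7, Ne.symm h7, h8, Ne.symm h8, h9, Ne.symm h9, h10, Ne.symm h10]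

theorem sentimentStep_eq (p n : Bool) (w : String) :
    sentimentStep (p, n) w = (p || isPosWord w, n || isNegWord w) := by
  cases h : sentimentDict.get? w with
  | none => simp [sentimentStep, isPosWord, isNegWord, h]
  | some v =>
    by_cases hv : v = "pos"
    · simp [sentimentStep, isPosWord, isNegWord, h, hv]
    · by_cases hv2 : v = "neg" <;> simp [sentimentStep, isPosWord, isNegWord, h, hv, hv2]

theorem foldl_flags (ws : List String) (p n : Bool) :
    ws.foldl sentimentStep (p, n) = (p || ws.any isPosWord, n || ws.any isNegWord) := by
  induction ws generalizing p n with
  | nil => simp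
  | cons w ws ih =>
    rw [List.foldl_cons, sentimentStep_eq, ih]
    simp [List.any_cons, Bool.or_assoc]

theorem any_swap (cues ws : List String) :
    cues.any (fun cue => ws.contains cue) = ws.any (fun w => cues.contains w) := by
  rw [Bool.eq_iff_iff]
  simp only [List.any_eq_true, List.contains_eq_mem, decide_eq_true_eq]
  constructor <;> rintro ⟨x, h1, h2⟩ <;> exact ⟨x, h2, h1⟩

-- ===== VERDICT (by name: the statement is the Claim_ definition above) =====
theorem check_emotional_cues_spec : Claim_equal_check_emotional_cues := by
  intro query _
  unfold Spec_check_emotional_cues check_emotional_cues check_emotional_cues_alt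
  simp only [foldl_flags, Bool.false_or, any_swap, ← isPos_iff, ← isNeg_iff]
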